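-- pv_equiv track=rewrite | github.com/NIDELKAD/PFE | ALGOS/SA_fonctions.py | random_vertex_clique
-- ===== SOURCE A (Python) =====
-- def random_vertex_clique(graph, vertex):
--
--     # Ajouter tous les voisins du sommet initial qui forment une clique
--     clique = set()
--     clique.add(vertex)
--
--     # Trier les voisins par degré dans l'ordre décroissant
--     neighbors_with_degree = [(neighbor, len(graph[neighbor])) for neighbor in graph[vertex]]
--     neighbors_with_degree.sort(key=lambda x: x[1], reverse=True)
--
--     # Ajout des voisins à la clique
--     for neighbor, _ in neighbors_with_degree:
--         if all(neigh in graph[neighbor] for neigh in clique):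
--             clique.add(neighbor)
--
--     return clique
-- ===== SOURCE B (Python) =====
-- def random_vertex_clique(graph, vertex):
--     # Same degree-descending stable order, but maintain an incrementally pruned
--     # candidate set instead of re-checking the whole clique for every neighbor.
--     order = sorted(graph[vertex], key=lambda n: len(graph[n]), reverse=True)
--     cands = {c for c in order if vertex in graph[c]}
--     clique = {vertex}
--     for n in order:
--         if n in cands:
--             clique.add(n)
--             cands = {c for c in cands if n in graph[c]}
--     return clique
-- ===== Notes on version B (the rewrite author's own statement) =====
-- stated objective: alternative
-- what changed: Instead of re-scanning the whole current clique for every neighbor, B keeps an incrementally pruned candidate set: a neighbor joins the clique iff it is still a candidate, and each accepted member n prunes the candidates to those c with n in graph[c].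
import Mathlib
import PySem

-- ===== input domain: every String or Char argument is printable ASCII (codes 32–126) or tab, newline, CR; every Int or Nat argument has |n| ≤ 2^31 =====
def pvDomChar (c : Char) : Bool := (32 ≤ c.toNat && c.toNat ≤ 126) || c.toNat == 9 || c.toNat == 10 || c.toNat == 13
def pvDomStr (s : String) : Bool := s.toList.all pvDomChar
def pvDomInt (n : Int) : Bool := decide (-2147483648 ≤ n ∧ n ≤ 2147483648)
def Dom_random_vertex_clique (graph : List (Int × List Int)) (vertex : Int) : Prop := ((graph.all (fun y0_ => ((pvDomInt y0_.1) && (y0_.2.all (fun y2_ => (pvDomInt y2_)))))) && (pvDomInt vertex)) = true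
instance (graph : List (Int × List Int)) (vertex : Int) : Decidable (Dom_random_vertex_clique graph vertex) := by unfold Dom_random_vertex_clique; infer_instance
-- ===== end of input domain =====

-- B replaces A's per-neighbor re-scan of the whole clique by an incrementally
-- pruned candidate set (alternative decomposition; return value only, no mutation).

-- ===== PORT A =====
def random_vertex_clique (graph : List (Int × List Int)) (vertex : Int) : List Int :=
  let g : PySem.Dict Int (List Int) := PySem.Dict.mk graph
  let clique : PySem.Set Int := PySem.Set.add PySem.Set.empty vertex
  let neighbors_with_degree : List (Int × Int) :=
    (g.getD vertex []).map (fun neighbor => (neighbor, ((g.getD neighbor []).length : Int)))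
  let sortedPairs := PySem.List.sorted neighbors_with_degree (fun x => x.2) true
  sortedPairs.foldl
    (fun clique p =>
      if clique.all (fun neigh => decide (neigh ∈ g.getD p.1 [])) then
        PySem.Set.add clique p.1
      else clique)
    clique

-- ===== PORT B =====
def random_vertex_clique_alt (graph : List (Int × List Int)) (vertex : Int) : List Int :=
  let g : PySem.Dict Int (List Int) := PySem.Dict.mk graph
  let order := PySem.List.sorted (g.getD vertex []) (fun n => ((g.getD n []).length : Int)) true
  let cands : PySem.Set Int :=
    PySem.Set.ofList (order.filter (fun c => decide (vertex ∈ g.getD c [])))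
  let clique : PySem.Set Int := PySem.Set.add PySem.Set.empty vertex
  (order.foldl
    (fun (st : PySem.Set Int × PySem.Set Int) n =>
      if st.2.contains n then
        (PySem.Set.add st.1 n, st.2.filter (fun c => decide (n ∈ g.getD c [])))
      else st)
    (clique, cands)).1

-- ===== PRECONDITION & SPEC =====
-- Pre_ excludes exactly the inputs where Python A raises KeyError:
-- vertex must be a key of graph, and so must every neighbor in graph[vertex].
def pvIsKey (graph : List (Int × List Int)) (k : Int) : Bool :=
  graph.any (fun p => p.1 == k)
def pvAdj (graph : List (Int × List Int)) (k : Int) : List Int :=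
  ((graph.find? (fun p => p.1 == k)).map Prod.snd).getD []
def Pre_random_vertex_clique (graph : List (Int × List Int)) (vertex : Int) : Prop :=
  pvIsKey graph vertex = true ∧ (pvAdj graph vertex).all (fun n => pvIsKey graph n) = true
instance (graph : List (Int × List Int)) (vertex : Int) : Decidable (Pre_random_vertex_clique graph vertex) := by unfold Pre_random_vertex_clique; infer_instance
def pvWitness_random_vertex_clique : (List (Int × List Int)) × Int :=
  ([(0, [1, 2]), (1, [0, 2]), (2, [0, 1])], 0)

def Spec_random_vertex_clique (graph : List (Int × List Int)) (vertex : Int) (out : List Int) : Prop := out = random_vertex_clique_alt graph vertex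
instance (graph : List (Int × List Int)) (vertex : Int) (out : List Int) : Decidable (Spec_random_vertex_clique graph vertex out) := by unfold Spec_random_vertex_clique; infer_instance

-- ===== CLAIM (what is proved, stated in full; the proofs are below) =====
def Claim_equal_random_vertex_clique : Prop := ∀ (graph : List (Int × List Int)) (vertex : Int), Dom_random_vertex_clique graph vertex → Pre_random_vertex_clique graph vertex → Spec_random_vertex_clique graph vertex (random_vertex_clique graph vertex)

-- ===== LEMMAS AND PROOFS =====

theorem random_vertex_clique_map_insertBy
    {α β : Type} (f : α → β) (bef : α → α → Bool) (bef' : β → β → Bool)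
    (hb : ∀ a b, bef' (f a) (f b) = bef a b) (x : α) :
    ∀ ys : List α,
      (PySem.List.insertBy bef x ys).map f
        = PySem.List.insertBy bef' (f x) (ys.map f) := by
  intro ys
  induction ys with
  | nil => simp [PySem.List.insertBy]
  | cons y ys ih =>
    simp only [PySem.List.insertBy, List.map_cons, hb]
    by_cases h : bef x y = true
    · simp [h]
    · simp only [h] at *
      simp [ih]

theorem random_vertex_clique_map_foldl_insertBy
    {α β : Type} (f : α → β) (bef : α → α → Bool) (bef' : β → β → Bool)
    (hb : ∀ a b, bef' (f a) (f b) = bef a b) :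
    ∀ (xs : List α) (acc : List α),
      (xs.foldl (fun acc x => PySem.List.insertBy bef x acc) acc).map f
        = xs.foldl (fun acc x => PySem.List.insertBy bef' (f x) acc) (acc.map f) := by
  intro xs
  induction xs with
  | nil => intro acc; rfl
  | cons x xs ih =>
    intro acc
    simp only [List.foldl_cons, ih, random_vertex_clique_map_insertBy f bef bef' hb]

theorem random_vertex_clique_map_sorted
    (xs : List Int) (f : Int → Int) :
    PySem.List.sorted (xs.map (fun n => (n, f n))) (fun x => x.2) true
      = (PySem.List.sorted xs f true).map (fun n => (n, f n)) := by
  rw [PySem.List.sorted_rev_eq_foldl_insertBy, PySem.List.sorted_rev_eq_foldl_insertBy,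
      List.foldl_map]
  rw [random_vertex_clique_map_foldl_insertBy (fun n => (n, f n))
        (fun a b => decide (f b < f a)) (fun a b => decide (b.2 < a.2)) (fun a b => rfl)]
  rfl

theorem random_vertex_clique_loop
    (g : PySem.Dict Int (List Int)) (l : List Int) :
    ∀ (clique cands : PySem.Set Int),
      (∀ c ∈ l, (cands.contains c = true ↔ ∀ m ∈ clique, m ∈ g.getD c [])) →
      (l.foldl
        (fun (st : PySem.Set Int × PySem.Set Int) n =>
          if st.2.contains n then
            (PySem.Set.add st.1 n, st.2.filter (fun c => decide (n ∈ g.getD c [])))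
          else st)
        (clique, cands)).1
      = l.foldl
          (fun clique n =>
            if clique.all (fun neigh => decide (neigh ∈ g.getD n [])) then
              PySem.Set.add clique n
            else clique)
          clique := by
  induction l with
  | nil => intro clique cands h; rfl
  | cons n l ih =>
    intro clique cands h
    have hn : cands.contains n = true ↔ ∀ m ∈ clique, m ∈ g.getD n [] :=
      h n (List.mem_cons_self ..)
    have hcond : cands.contains n = clique.all (fun neigh => decide (neigh ∈ g.getD n [])) := by
      by_cases hc : cands.contains n = true
      · rw [hc]
        symm
        simpa using hn.mp hc
      · have hc' : cands.contains n = false := by simpa using hc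
        rw [hc']
        symm
        refine Bool.eq_false_iff.mpr ?_
        intro hall
        exact hc (hn.mpr (by simpa using hall))
    simp only [List.foldl_cons, ← hcond]
    by_cases hc : cands.contains n = true
    · simp only [hc, if_true]
      apply ih
      intro c hcl
      simp only [PySem.Set.contains, List.contains_iff_mem, List.mem_filter,
        decide_eq_true_eq] at *
      constructor
      · rintro ⟨hcmem, hng⟩ m hm
        rcases (PySem.Set.mem_add clique n m).mp hm with hm' | rfl
        · exact ((h c (List.mem_cons_of_mem _ hcl)).mp (by simpa [PySem.Set.contains, List.contains_iff_mem] using hcmem)) m hm'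
        · exact hng
      · intro hall
        refine ⟨?_, hall n ((PySem.Set.mem_add clique n n).mpr (Or.inr rfl))⟩
        have : ∀ m ∈ clique, m ∈ g.getD c [] := fun m hm =>
          hall m ((PySem.Set.mem_add clique n m).mpr (Or.inl hm))
        simpa [PySem.Set.contains, List.contains_iff_mem] using
          (h c (List.mem_cons_of_mem _ hcl)).mpr this
    · simp only [hc]
      exact ih clique cands (fun c hcl => h c (List.mem_cons_of_mem _ hcl))

-- ===== VERDICT (by name: the statement is the Claim_ definition above) =====
theorem random_vertex_clique_spec : Claim_equal_random_vertex_clique := by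
  intro graph vertex _dom _pre
  show random_vertex_clique graph vertex = random_vertex_clique_alt graph vertex
  unfold random_vertex_clique random_vertex_clique_alt
  simp only [random_vertex_clique_map_sorted, List.foldl_map]
  refine (random_vertex_clique_loop (PySem.Dict.mk graph) _ _ _ ?_).symm
  intro c hc
  simp only [PySem.Set.contains, List.contains_iff_mem, PySem.Set.mem_ofList,
    List.mem_filter, decide_eq_true_eq, PySem.Set.add, PySem.Set.empty,
    List.nil_append]
  simp [hc]
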